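-- pv_equiv track=rewrite | github.com/ugurrates/CABTA | src/utils/mitre_kill_chain.py | _longest_consecutive_chain
-- ===== SOURCE A (Python) =====
-- from typing import Dict, List, Tuple
--
-- PHASES = [
--     'Initial Access',
--     'Execution',
--     'Persistence',
--     'Privilege Escalation',
--     'Defense Evasion',
--     'Credential Access',
--     'Discovery',
--     'Lateral Movement',
--     'Collection',
--     'Command and Control',
--     'Exfiltration',
--     'Impact',
-- ]
--
-- def _longest_consecutive_chain(detected: List[str]) -> int:
--     """Find the longest consecutive kill-chain sequence."""
--     if not detected:
--         return 0
--     indices = sorted(PHASES.index(p) for p in detected if p in PHASES)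
--     if not indices:
--         return 0
--     longest = current = 1
--     for i in range(1, len(indices)):
--         if indices[i] - indices[i - 1] <= 1:
--             current += 1
--             longest = max(longest, current)
--         else:
--             current = 1
--     return longest
-- ===== SOURCE B (Python) =====
-- PHASES = [
--     'Initial Access',
--     'Execution',
--     'Persistence',
--     'Privilege Escalation',
--     'Defense Evasion',
--     'Credential Access',
--     'Discovery',
--     'Lateral Movement',
--     'Collection',
--     'Command and Control',
--     'Exfiltration',
--     'Impact',
-- ]
--
-- def _longest_consecutive_chain(detected):
--     """Counting rewrite: no per-occurrence index list and no sort; count each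
--     phase's occurrences, then a single scan of the 12 phases in kill-chain
--     order sums counts over contiguous present blocks."""
--     best = cur = 0
--     for phase in PHASES:
--         c = detected.count(phase)
--         if c:
--             cur += c
--             best = max(best, cur)
--         else:
--             cur = 0
--     return best
-- ===== Notes on version B (the rewrite author's own statement) =====
-- stated objective: alternative
-- what changed: A collects every detected phase's index, sorts that list and scans adjacent differences; B never builds or sorts an index list: it counts each phase's occurrences and makes one scan of the 12 phases in kill-chain order, summing counts over contiguous present blocks (intended as faster, O(n) vs O(n log n), but a timing run did not consistently confirm a speed-up, so none is claimed).
import Mathlib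
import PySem

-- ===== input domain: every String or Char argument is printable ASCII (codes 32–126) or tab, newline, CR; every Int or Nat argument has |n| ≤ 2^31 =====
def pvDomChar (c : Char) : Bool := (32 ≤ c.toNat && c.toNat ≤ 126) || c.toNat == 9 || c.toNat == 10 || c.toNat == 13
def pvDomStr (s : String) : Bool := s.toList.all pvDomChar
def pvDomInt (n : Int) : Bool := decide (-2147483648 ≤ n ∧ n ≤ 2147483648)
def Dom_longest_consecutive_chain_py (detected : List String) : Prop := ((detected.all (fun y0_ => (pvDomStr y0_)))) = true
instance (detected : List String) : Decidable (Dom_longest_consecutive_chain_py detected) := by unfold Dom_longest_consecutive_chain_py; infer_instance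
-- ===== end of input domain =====

-- B replaces A's sort-then-scan over per-occurrence phase indices by per-phase
-- occurrence counts plus a single in-order scan of the 12 phases; the return
-- values are proved identical on every input.

-- ===== PORT A =====
-- the module constant PHASES
def pvPHASES : List String :=
  ["Initial Access", "Execution", "Persistence", "Privilege Escalation",
   "Defense Evasion", "Credential Access", "Discovery", "Lateral Movement",
   "Collection", "Command and Control", "Exfiltration", "Impact"]

-- the generator body: PHASES.index(p) for p in ... if p in PHASES
def pvF (p : String) : Option Int :=
  if p ∈ pvPHASES then (PySem.List.index? pvPHASES p).map (fun n => (n : Int)) else none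

-- one iteration of A's for-loop; state ( indices[i-1], longest, current )
def pvAStep (s : Int × Int × Int) (x : Int) : Int × Int × Int :=
  if x - s.1 ≤ 1 then (x, max s.2.1 (s.2.2 + 1), s.2.2 + 1) else (x, s.2.1, 1)

def longest_consecutive_chain_py (detected : List String) : Int :=
  if detected = [] then 0
  else
    -- indices = sorted(PHASES.index(p) for p in detected if p in PHASES)
    let indices := PySem.List.sorted (detected.filterMap pvF) (fun x => x) false
    match indices with
    | [] => 0
    | h :: t => (t.foldl pvAStep (h, 1, 1)).2.1

-- ===== PORT B =====
-- one iteration of B's scan over the 12 phases; state ( best, cur ), c the phase's count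
def pvBStep (s : Int × Int) (c : Int) : Int × Int :=
  if c ≠ 0 then (max s.1 (s.2 + c), s.2 + c) else (s.1, 0)

def longest_consecutive_chain_py_alt (detected : List String) : Int :=
  -- scan the phases in kill-chain order; c = detected.count(phase)
  (pvPHASES.foldl (fun s phase => pvBStep s ((PySem.List.count detected phase : Nat) : Int)) (0, 0)).1

-- ===== PRECONDITION & SPEC =====
def Spec_longest_consecutive_chain_py (detected : List String) (out : Int) : Prop := out = longest_consecutive_chain_py_alt detected
instance (detected : List String) (out : Int) : Decidable (Spec_longest_consecutive_chain_py detected out) := by unfold Spec_longest_consecutive_chain_py; infer_instance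

-- ===== CLAIM (what is proved, stated in full; the proofs are below) =====
def Claim_equal_longest_consecutive_chain_py : Prop := ∀ (detected : List String), Dom_longest_consecutive_chain_py detected → Spec_longest_consecutive_chain_py detected (longest_consecutive_chain_py detected)

-- ===== LEMMAS AND PROOFS =====

-- the sorted index list arranged by value: counts c0..c11 expand to c0 copies of p,
-- c1 copies of p+1, ...
def pvBlocks (p : Int) : List Nat → List Int
  | [] => []
  | c :: cs => List.replicate c p ++ pvBlocks (p + 1) cs

-- per-phase occurrence counts of the input
def pvCnts (d : List String) : List Nat := pvPHASES.map (fun ph => d.count ph)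

theorem pvBlocks_bump (l₁ : List Nat) : ∀ (l₂ : List Nat) (p : Int) (c : Nat),
    (pvBlocks p (l₁ ++ (c + 1) :: l₂)).Perm ((p + l₁.length) :: pvBlocks p (l₁ ++ c :: l₂)) := by
  induction l₁ with
  | nil =>
    intro l₂ p c
    simp [pvBlocks, List.replicate_succ]
  | cons a l₁ ih =>
    intro l₂ p c
    simp only [List.cons_append, pvBlocks]
    refine ((List.Perm.append_left _ (ih l₂ (p+1) c)).trans ?_)
    have := List.perm_middle (a := p + 1 + (l₁.length : Int)) (l₁ := List.replicate a p)
      (l₂ := pvBlocks (p + 1) (l₁ ++ c :: l₂))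
    refine this.trans ?_
    have : p + 1 + (l₁.length : Int) = p + ((a :: l₁).length : Int) := by push_cast [List.length_cons]; ring
    rw [this]


theorem pvBlocks_sorted (cs : List Nat) : ∀ (p : Int),
    (pvBlocks p cs).Pairwise (· ≤ ·) ∧ ∀ x ∈ pvBlocks p cs, p ≤ x := by
  induction cs with
  | nil => intro p; simp [pvBlocks]
  | cons c cs ih =>
    intro p
    simp only [pvBlocks]
    constructor
    · rw [List.pairwise_append]
      refine ⟨List.pairwise_replicate.2 (by simp), (ih (p+1)).1, ?_⟩
      intro x hx y hy
      have := List.eq_of_mem_replicate hx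
      have := (ih (p+1)).2 y hy
      omega
    · intro x hx
      rcases List.mem_append.1 hx with h | h
      · have := List.eq_of_mem_replicate h; omega
      · have := (ih (p+1)).2 x h; omega


theorem pvPerm_blocks (d : List String) :
    (d.filterMap pvF).Perm (pvBlocks 0 (pvCnts d)) := by
  induction d with
  | nil => simp [pvF, pvCnts, pvPHASES, pvBlocks]
  | cons p ds ih =>
    by_cases hm : p ∈ pvPHASES
    · simp only [pvPHASES, List.mem_cons, List.not_mem_nil, or_false] at hm
      rcases hm with rfl|rfl|rfl|rfl|rfl|rfl|rfl|rfl|rfl|rfl|rfl|rfl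
      · rw [List.filterMap_cons_some (show pvF "Initial Access" = some (0:Int) from by decide)]
        have hc : pvCnts ("Initial Access" :: ds) = [(ds.count "Initial Access") + 1, (ds.count "Execution"), (ds.count "Persistence"), (ds.count "Privilege Escalation"), (ds.count "Defense Evasion"), (ds.count "Credential Access"), (ds.count "Discovery"), (ds.count "Lateral Movement"), (ds.count "Collection"), (ds.count "Command and Control"), (ds.count "Exfiltration"), (ds.count "Impact")] := by
          simp [pvCnts, pvPHASES, List.count_cons]
        rw [hc]
        exact (List.Perm.cons _ ih).trans
          (by simpa [pvCnts, pvPHASES] using (pvBlocks_bump [] [(ds.count "Execution"), (ds.count "Persistence"), (ds.count "Privilege Escalation"), (ds.count "Defense Evasion"), (ds.count "Credential Access"), (ds.count "Discovery"), (ds.count "Lateral Movement"), (ds.count "Collection"), (ds.count "Command and Control"), (ds.count "Exfiltration"), (ds.count "Impact")] 0 (ds.count "Initial Access")).symm)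
      · rw [List.filterMap_cons_some (show pvF "Execution" = some (1:Int) from by decide)]
        have hc : pvCnts ("Execution" :: ds) = [(ds.count "Initial Access"), (ds.count "Execution") + 1, (ds.count "Persistence"), (ds.count "Privilege Escalation"), (ds.count "Defense Evasion"), (ds.count "Credential Access"), (ds.count "Discovery"), (ds.count "Lateral Movement"), (ds.count "Collection"), (ds.count "Command and Control"), (ds.count "Exfiltration"), (ds.count "Impact")] := by
          simp [pvCnts, pvPHASES, List.count_cons]
        rw [hc]
        exact (List.Perm.cons _ ih).trans
          (by simpa [pvCnts, pvPHASES] using (pvBlocks_bump [(ds.count "Initial Access")] [(ds.count "Persistence"), (ds.count "Privilege Escalation"), (ds.count "Defense Evasion"), (ds.count "Credential Access"), (ds.count "Discovery"), (ds.count "Lateral Movement"), (ds.count "Collection"), (ds.count "Command and Control"), (ds.count "Exfiltration"), (ds.count "Impact")] 0 (ds.count "Execution")).symm)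
      · rw [List.filterMap_cons_some (show pvF "Persistence" = some (2:Int) from by decide)]
        have hc : pvCnts ("Persistence" :: ds) = [(ds.count "Initial Access"), (ds.count "Execution"), (ds.count "Persistence") + 1, (ds.count "Privilege Escalation"), (ds.count "Defense Evasion"), (ds.count "Credential Access"), (ds.count "Discovery"), (ds.count "Lateral Movement"), (ds.count "Collection"), (ds.count "Command and Control"), (ds.count "Exfiltration"), (ds.count "Impact")] := by
          simp [pvCnts, pvPHASES, List.count_cons]
        rw [hc]
        exact (List.Perm.cons _ ih).trans
          (by simpa [pvCnts, pvPHASES] using (pvBlocks_bump [(ds.count "Initial Access"), (ds.count "Execution")] [(ds.count "Privilege Escalation"), (ds.count "Defense Evasion"), (ds.count "Credential Access"), (ds.count "Discovery"), (ds.count "Lateral Movement"), (ds.count "Collection"), (ds.count "Command and Control"), (ds.count "Exfiltration"), (ds.count "Impact")] 0 (ds.count "Persistence")).symm)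
      · rw [List.filterMap_cons_some (show pvF "Privilege Escalation" = some (3:Int) from by decide)]
        have hc : pvCnts ("Privilege Escalation" :: ds) = [(ds.count "Initial Access"), (ds.count "Execution"), (ds.count "Persistence"), (ds.count "Privilege Escalation") + 1, (ds.count "Defense Evasion"), (ds.count "Credential Access"), (ds.count "Discovery"), (ds.count "Lateral Movement"), (ds.count "Collection"), (ds.count "Command and Control"), (ds.count "Exfiltration"), (ds.count "Impact")] := by
          simp [pvCnts, pvPHASES, List.count_cons]
        rw [hc]
        exact (List.Perm.cons _ ih).trans
          (by simpa [pvCnts, pvPHASES] using (pvBlocks_bump [(ds.count "Initial Access"), (ds.count "Execution"), (ds.count "Persistence")] [(ds.count "Defense Evasion"), (ds.count "Credential Access"), (ds.count "Discovery"), (ds.count "Lateral Movement"), (ds.count "Collection"), (ds.count "Command and Control"), (ds.count "Exfiltration"), (ds.count "Impact")] 0 (ds.count "Privilege Escalation")).symm)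
      · rw [List.filterMap_cons_some (show pvF "Defense Evasion" = some (4:Int) from by decide)]
        have hc : pvCnts ("Defense Evasion" :: ds) = [(ds.count "Initial Access"), (ds.count "Execution"), (ds.count "Persistence"), (ds.count "Privilege Escalation"), (ds.count "Defense Evasion") + 1, (ds.count "Credential Access"), (ds.count "Discovery"), (ds.count "Lateral Movement"), (ds.count "Collection"), (ds.count "Command and Control"), (ds.count "Exfiltration"), (ds.count "Impact")] := by
          simp [pvCnts, pvPHASES, List.count_cons]
        rw [hc]
        exact (List.Perm.cons _ ih).trans
          (by simpa [pvCnts, pvPHASES] using (pvBlocks_bump [(ds.count "Initial Access"), (ds.count "Execution"), (ds.count "Persistence"), (ds.count "Privilege Escalation")] [(ds.count "Credential Access"), (ds.count "Discovery"), (ds.count "Lateral Movement"), (ds.count "Collection"), (ds.count "Command and Control"), (ds.count "Exfiltration"), (ds.count "Impact")] 0 (ds.count "Defense Evasion")).symm)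
      · rw [List.filterMap_cons_some (show pvF "Credential Access" = some (5:Int) from by decide)]
        have hc : pvCnts ("Credential Access" :: ds) = [(ds.count "Initial Access"), (ds.count "Execution"), (ds.count "Persistence"), (ds.count "Privilege Escalation"), (ds.count "Defense Evasion"), (ds.count "Credential Access") + 1, (ds.count "Discovery"), (ds.count "Lateral Movement"), (ds.count "Collection"), (ds.count "Command and Control"), (ds.count "Exfiltration"), (ds.count "Impact")] := by
          simp [pvCnts, pvPHASES, List.count_cons]
        rw [hc]
        exact (List.Perm.cons _ ih).trans
          (by simpa [pvCnts, pvPHASES] using (pvBlocks_bump [(ds.count "Initial Access"), (ds.count "Execution"), (ds.count "Persistence"), (ds.count "Privilege Escalation"), (ds.count "Defense Evasion")] [(ds.count "Discovery"), (ds.count "Lateral Movement"), (ds.count "Collection"), (ds.count "Command and Control"), (ds.count "Exfiltration"), (ds.count "Impact")] 0 (ds.count "Credential Access")).symm)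
      · rw [List.filterMap_cons_some (show pvF "Discovery" = some (6:Int) from by decide)]
        have hc : pvCnts ("Discovery" :: ds) = [(ds.count "Initial Access"), (ds.count "Execution"), (ds.count "Persistence"), (ds.count "Privilege Escalation"), (ds.count "Defense Evasion"), (ds.count "Credential Access"), (ds.count "Discovery") + 1, (ds.count "Lateral Movement"), (ds.count "Collection"), (ds.count "Command and Control"), (ds.count "Exfiltration"), (ds.count "Impact")] := by
          simp [pvCnts, pvPHASES, List.count_cons]
        rw [hc]
        exact (List.Perm.cons _ ih).trans
          (by simpa [pvCnts, pvPHASES] using (pvBlocks_bump [(ds.count "Initial Access"), (ds.count "Execution"), (ds.count "Persistence"), (ds.count "Privilege Escalation"), (ds.count "Defense Evasion"), (ds.count "Credential Access")] [(ds.count "Lateral Movement"), (ds.count "Collection"), (ds.count "Command and Control"), (ds.count "Exfiltration"), (ds.count "Impact")] 0 (ds.count "Discovery")).symm)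
      · rw [List.filterMap_cons_some (show pvF "Lateral Movement" = some (7:Int) from by decide)]
        have hc : pvCnts ("Lateral Movement" :: ds) = [(ds.count "Initial Access"), (ds.count "Execution"), (ds.count "Persistence"), (ds.count "Privilege Escalation"), (ds.count "Defense Evasion"), (ds.count "Credential Access"), (ds.count "Discovery"), (ds.count "Lateral Movement") + 1, (ds.count "Collection"), (ds.count "Command and Control"), (ds.count "Exfiltration"), (ds.count "Impact")] := by
          simp [pvCnts, pvPHASES, List.count_cons]
        rw [hc]
        exact (List.Perm.cons _ ih).trans
          (by simpa [pvCnts, pvPHASES] using (pvBlocks_bump [(ds.count "Initial Access"), (ds.count "Execution"), (ds.count "Persistence"), (ds.count "Privilege Escalation"), (ds.count "Defense Evasion"), (ds.count "Credential Access"), (ds.count "Discovery")] [(ds.count "Collection"), (ds.count "Command and Control"), (ds.count "Exfiltration"), (ds.count "Impact")] 0 (ds.count "Lateral Movement")).symm)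
      · rw [List.filterMap_cons_some (show pvF "Collection" = some (8:Int) from by decide)]
        have hc : pvCnts ("Collection" :: ds) = [(ds.count "Initial Access"), (ds.count "Execution"), (ds.count "Persistence"), (ds.count "Privilege Escalation"), (ds.count "Defense Evasion"), (ds.count "Credential Access"), (ds.count "Discovery"), (ds.count "Lateral Movement"), (ds.count "Collection") + 1, (ds.count "Command and Control"), (ds.count "Exfiltration"), (ds.count "Impact")] := by
          simp [pvCnts, pvPHASES, List.count_cons]
        rw [hc]
        exact (List.Perm.cons _ ih).trans
          (by simpa [pvCnts, pvPHASES] using (pvBlocks_bump [(ds.count "Initial Access"), (ds.count "Execution"), (ds.count "Persistence"), (ds.count "Privilege Escalation"), (ds.count "Defense Evasion"), (ds.count "Credential Access"), (ds.count "Discovery"), (ds.count "Lateral Movement")] [(ds.count "Command and Control"), (ds.count "Exfiltration"), (ds.count "Impact")] 0 (ds.count "Collection")).symm)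
      · rw [List.filterMap_cons_some (show pvF "Command and Control" = some (9:Int) from by decide)]
        have hc : pvCnts ("Command and Control" :: ds) = [(ds.count "Initial Access"), (ds.count "Execution"), (ds.count "Persistence"), (ds.count "Privilege Escalation"), (ds.count "Defense Evasion"), (ds.count "Credential Access"), (ds.count "Discovery"), (ds.count "Lateral Movement"), (ds.count "Collection"), (ds.count "Command and Control") + 1, (ds.count "Exfiltration"), (ds.count "Impact")] := by
          simp [pvCnts, pvPHASES, List.count_cons]
        rw [hc]
        exact (List.Perm.cons _ ih).trans
          (by simpa [pvCnts, pvPHASES] using (pvBlocks_bump [(ds.count "Initial Access"), (ds.count "Execution"), (ds.count "Persistence"), (ds.count "Privilege Escalation"), (ds.count "Defense Evasion"), (ds.count "Credential Access"), (ds.count "Discovery"), (ds.count "Lateral Movement"), (ds.count "Collection")] [(ds.count "Exfiltration"), (ds.count "Impact")] 0 (ds.count "Command and Control")).symm)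
      · rw [List.filterMap_cons_some (show pvF "Exfiltration" = some (10:Int) from by decide)]
        have hc : pvCnts ("Exfiltration" :: ds) = [(ds.count "Initial Access"), (ds.count "Execution"), (ds.count "Persistence"), (ds.count "Privilege Escalation"), (ds.count "Defense Evasion"), (ds.count "Credential Access"), (ds.count "Discovery"), (ds.count "Lateral Movement"), (ds.count "Collection"), (ds.count "Command and Control"), (ds.count "Exfiltration") + 1, (ds.count "Impact")] := by
          simp [pvCnts, pvPHASES, List.count_cons]
        rw [hc]
        exact (List.Perm.cons _ ih).trans
          (by simpa [pvCnts, pvPHASES] using (pvBlocks_bump [(ds.count "Initial Access"), (ds.count "Execution"), (ds.count "Persistence"), (ds.count "Privilege Escalation"), (ds.count "Defense Evasion"), (ds.count "Credential Access"), (ds.count "Discovery"), (ds.count "Lateral Movement"), (ds.count "Collection"), (ds.count "Command and Control")] [(ds.count "Impact")] 0 (ds.count "Exfiltration")).symm)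
      · rw [List.filterMap_cons_some (show pvF "Impact" = some (11:Int) from by decide)]
        have hc : pvCnts ("Impact" :: ds) = [(ds.count "Initial Access"), (ds.count "Execution"), (ds.count "Persistence"), (ds.count "Privilege Escalation"), (ds.count "Defense Evasion"), (ds.count "Credential Access"), (ds.count "Discovery"), (ds.count "Lateral Movement"), (ds.count "Collection"), (ds.count "Command and Control"), (ds.count "Exfiltration"), (ds.count "Impact") + 1] := by
          simp [pvCnts, pvPHASES, List.count_cons]
        rw [hc]
        exact (List.Perm.cons _ ih).trans
          (by simpa [pvCnts, pvPHASES] using (pvBlocks_bump [(ds.count "Initial Access"), (ds.count "Execution"), (ds.count "Persistence"), (ds.count "Privilege Escalation"), (ds.count "Defense Evasion"), (ds.count "Credential Access"), (ds.count "Discovery"), (ds.count "Lateral Movement"), (ds.count "Collection"), (ds.count "Command and Control"), (ds.count "Exfiltration")] [] 0 (ds.count "Impact")).symm)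
    · rw [List.filterMap_cons_none (show pvF p = none from by simp [pvF, hm])]
      have hc : pvCnts (p :: ds) = pvCnts ds := by
        refine List.map_congr_left fun ph hph => ?_
        have hne : (p == ph) = false := beq_eq_false_iff_ne.2 (fun h => hm (h ▸ hph))
        rw [List.count_cons]
        simp [hne]
      rw [hc]; exact ih

theorem pvBStep_zero (s : Int × Int) : pvBStep s ((0:Nat) : Int) = (s.1, 0) := by
  simp [pvBStep]

theorem pvBStep_succ (s : Int × Int) (m : Nat) :
    pvBStep s ((m+1 : Nat) : Int) = (max s.1 (s.2 + 1 + m), s.2 + 1 + m) := by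
  have h : ((m+1 : Nat) : Int) ≠ 0 := by omega
  simp only [pvBStep, if_pos h]
  refine Prod.ext ?_ ?_ <;> simp <;> ring_nf

theorem pvSub1 (n : Nat) : ∀ (p L C : Int) (rest : List Int), 1 ≤ C → C ≤ L →
    List.foldl pvAStep (p, L, C) (List.replicate n p ++ rest)
      = List.foldl pvAStep (p, max L (C + n), C + n) rest := by
  induction n with
  | zero => intro p L C rest h1 h2; simp [max_eq_left h2]
  | succ n ih =>
    intro p L C rest h1 h2
    rw [List.replicate_succ, List.cons_append, List.foldl_cons]
    have hstep : pvAStep (p, L, C) p = (p, max L (C + 1), C + 1) := by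
      simp [pvAStep]
    rw [hstep, ih p (max L (C+1)) (C+1) rest (by omega) (le_max_right _ _)]
    have h3 : max (C + 1) (C + 1 + (n:Int)) = C + 1 + n := max_eq_right (by omega)
    rw [max_assoc, h3]
    have : C + 1 + (n : Int) = C + ((n:Nat) + 1 : Nat) := by push_cast; ring
    rw [this]

theorem pvMain (cs : List Nat) : ∀ (p prev L C : Int), 1 ≤ C → C ≤ L → prev ≤ p - 1 →
    (List.foldl pvAStep (prev, L, C) (pvBlocks p cs)).2.1
      = (List.foldl (fun (s : Int × Int) (c : Nat) => pvBStep s (c : Int))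
          (L, if prev = p - 1 then C else 0) cs).1 := by
  induction cs with
  | nil => intro p prev L C h1 h2 h3; simp [pvBlocks]
  | cons c cs ih =>
    intro p prev L C h1 h2 h3
    simp only [pvBlocks, List.foldl_cons]
    cases c with
    | zero =>
      simp only [List.replicate, List.nil_append]
      rw [ih (p+1) prev L C h1 h2 (by omega)]
      rw [show (if prev = p + 1 - 1 then C else 0) = 0 from if_neg (by omega), pvBStep_zero]
    | succ m =>
      rw [List.replicate_succ, List.cons_append, List.foldl_cons, pvBStep_succ]
      by_cases hp : prev = p - 1
      · have hstep : pvAStep (prev, L, C) p = (p, max L (C + 1), C + 1) := by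
          simp [pvAStep]; omega
        rw [hstep, pvSub1 m p (max L (C+1)) (C+1) _ (by omega) (le_max_right _ _)]
        have h3 : max (C + 1) (C + 1 + (m:Int)) = C + 1 + m := max_eq_right (by omega)
        rw [max_assoc, h3]
        rw [ih (p+1) p (max L (C+1+m)) (C+1+m) (by omega) (le_max_right _ _) (by omega)]
        rw [show (if prev = p - 1 then C else 0) = C from if_pos hp,
            show (if p = p + 1 - 1 then C+1+(m:Int) else 0) = C+1+m from if_pos (by omega)]
      · have hstep : pvAStep (prev, L, C) p = (p, L, 1) := by
          simp [pvAStep]; omega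
        rw [hstep, pvSub1 m p L 1 _ le_rfl (by omega)]
        rw [show (if prev = p - 1 then C else 0) = 0 from if_neg hp]
        simp only [zero_add]
        rw [ih (p+1) p (max L (1+m)) (1+m) (by omega) (le_max_right _ _) (by omega)]
        rw [show (if p = p + 1 - 1 then 1+(m:Int) else 0) = 1+m from if_pos (by omega)]

theorem pvStart (cs : List Nat) : ∀ (p : Int),
    (match pvBlocks p cs with
      | [] => (0 : Int)
      | h :: t => (List.foldl pvAStep (h, 1, 1) t).2.1)
      = (List.foldl (fun (s : Int × Int) (c : Nat) => pvBStep s (c : Int)) (0, 0) cs).1 := by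
  induction cs with
  | nil => intro p; simp [pvBlocks]
  | cons c cs ih =>
    intro p
    cases c with
    | zero =>
      simp only [pvBlocks, List.replicate, List.nil_append, List.foldl_cons]
      rw [ih (p+1), pvBStep_zero]
    | succ m =>
      simp only [pvBlocks, List.replicate_succ, List.cons_append, List.foldl_cons]
      rw [pvSub1 m p 1 1 _ le_rfl le_rfl]
      rw [pvMain cs (p+1) p (max 1 (1+(m:Int))) (1+m) (by omega) (le_max_right _ _) (by omega)]
      rw [pvBStep_succ]
      simp only [zero_add]
      rw [show max (0:Int) (1 + m) = 1 + m from max_eq_right (by omega),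
          show max (1:Int) (1 + m) = 1 + m from max_eq_right (by omega),
          show (if p = p + 1 - 1 then 1+(m:Int) else 0) = 1+m from if_pos (by omega)]


-- ===== VERDICT (by name: the statement is the Claim_ definition above) =====
theorem longest_consecutive_chain_py_spec : Claim_equal_longest_consecutive_chain_py := by
  intro detected _
  unfold Spec_longest_consecutive_chain_py
  unfold longest_consecutive_chain_py longest_consecutive_chain_py_alt
  have hB : (pvPHASES.foldl
        (fun s phase => pvBStep s ((PySem.List.count detected phase : Nat) : Int))
        ((0 : Int), (0 : Int)))
      = List.foldl (fun (s : Int × Int) (c : Nat) => pvBStep s (c : Int)) (0, 0) (pvCnts detected) := by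
    rw [pvCnts, List.foldl_map]
    refine PySem.List.foldl_congr_mem _ _ _ _ (fun s ph _ => ?_)
    rw [PySem.List.count_eq]
  by_cases hd : detected = []
  · subst hd
    rw [if_pos rfl]
    rfl
  · rw [if_neg hd]
    have hsorted : PySem.List.sorted (detected.filterMap pvF) (fun x => x) false
        = pvBlocks 0 (pvCnts detected) :=
      PySem.List.sorted_id_eq_of_perm_of_pairwise _ _ (pvPerm_blocks detected).symm
        (pvBlocks_sorted (pvCnts detected) 0).1
    show (match PySem.List.sorted (detected.filterMap pvF) (fun x => x) false with
      | [] => (0 : Int)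
      | h :: t => (t.foldl pvAStep (h, 1, 1)).2.1)
      = (List.foldl (fun s phase => pvBStep s ((PySem.List.count detected phase : Nat) : Int))
          ((0 : Int), (0 : Int)) pvPHASES).1
    rw [hsorted, hB]
    exact pvStart (pvCnts detected) 0
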